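-- pv_equiv track=rewrite | github.com/Shirish-GovindShrestha/Alarm-Website | models/ner_model.py | fix_bio_sequence
-- ===== SOURCE A (Python) =====
-- def fix_bio_sequence(tags):
--     """Fix BIO tag sequence inconsistencies"""
--     if not tags:
--         return tags
--
--     fixed_tags = []
--     prev_entity_type = None
--
--     for tag in tags:
--         if tag == "O":
--             fixed_tags.append(tag)
--             prev_entity_type = None
--         elif tag.startswith("B-"):
--             entity_type = tag[2:]
--             fixed_tags.append(tag)
--             prev_entity_type = entity_type
--         elif tag.startswith("I-"):
--             entity_type = tag[2:]
--             # If I- tag appears without preceding B- of same type, convert to B-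
--             if prev_entity_type != entity_type:
--                 fixed_tags.append(f"B-{entity_type}")
--             else:
--                 fixed_tags.append(tag)
--             prev_entity_type = entity_type
--         else:
--             # Handle any other tags
--             fixed_tags.append(tag)
--             prev_entity_type = None
--
--     return fixed_tags
-- ===== SOURCE B (Python) =====
-- def fix_bio_sequence(tags):
--     """Fix BIO tag sequence inconsistencies.
--
--     Span-based algorithm: instead of correcting tags one by one with carried
--     state, scan the list as a sequence of entity SPANS. Whenever a B-/I- tag
--     is met it opens a span: emit its (normalized) B- opener, then consume the
--     whole maximal run of following "I-<type>" continuation tags unchanged in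
--     an inner loop. Everything else is copied verbatim.
--     """
--     out = []
--     i = 0
--     n = len(tags)
--     while i < n:
--         t = tags[i]
--         if t.startswith("B-") or t.startswith("I-"):
--             et = t[2:]
--             out.append(t if t.startswith("B-") else "B-" + et)
--             cont = "I-" + et
--             j = i + 1
--             while j < n and tags[j] == cont:
--                 out.append(tags[j])
--                 j += 1
--             i = j
--         else:
--             out.append(t)
--             i += 1
--     return out
-- ===== Notes on version B (the rewrite author's own statement) =====
-- stated objective: alternative
-- what changed: Replaces A's per-tag pass with a carried prev_entity_type accumulator by a span-based scan: each B-/I- tag opens an entity span whose normalized B- opener is emitted and whose maximal run of matching I- continuation tags is consumed unchanged by an inner loop.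
import Mathlib
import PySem

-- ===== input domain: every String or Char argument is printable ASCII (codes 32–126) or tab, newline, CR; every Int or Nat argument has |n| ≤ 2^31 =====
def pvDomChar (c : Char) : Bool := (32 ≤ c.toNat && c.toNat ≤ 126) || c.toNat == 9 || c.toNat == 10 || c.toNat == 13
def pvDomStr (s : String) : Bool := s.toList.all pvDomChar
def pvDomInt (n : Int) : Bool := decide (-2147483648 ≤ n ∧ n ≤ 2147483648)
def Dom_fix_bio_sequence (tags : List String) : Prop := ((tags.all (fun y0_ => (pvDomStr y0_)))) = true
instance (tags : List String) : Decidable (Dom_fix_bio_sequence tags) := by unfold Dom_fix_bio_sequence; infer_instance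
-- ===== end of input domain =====

-- B replaces A's per-tag pass with a carried accumulator by a span-based scan (emit a normalized opener, consume the matching I- run); same O(n) cost.

-- string concatenation f"B-{x}" (code-point append, exact)
def strCat (a b : String) : String := String.ofList (a.toList ++ b.toList)

-- ===== PORT A =====
def fixBioLoop (tags : List String) (fixed : List String) (prev : Option String) : List String :=
  match tags with
  | [] => fixed
  | tag :: rest =>
    if tag = "O" then
      fixBioLoop rest (fixed ++ [tag]) none
    else if PySem.Str.startswith tag "B-" then
      fixBioLoop rest (fixed ++ [tag]) (some (PySem.Str.slice tag (some 2) none))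
    else if PySem.Str.startswith tag "I-" then
      let et := PySem.Str.slice tag (some 2) none
      fixBioLoop rest (fixed ++ [if prev ≠ some et then strCat "B-" et else tag]) (some et)
    else
      fixBioLoop rest (fixed ++ [tag]) none

def fix_bio_sequence (tags : List String) : List String :=
  if tags = [] then tags else fixBioLoop tags [] none

-- ===== PORT B =====
-- the inner while of Source B: split off the maximal run of tags equal to cont
def splitRun (cont : String) : List String → List String × List String
  | [] => ([], [])
  | x :: xs =>
    if x = cont then
      let p := splitRun cont xs
      (x :: p.1, p.2)
    else ([], x :: xs)

theorem splitRun_snd_length_le (cont : String) : ∀ (l : List String), (splitRun cont l).2.length ≤ l.length := by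
  intro l
  induction l with
  | nil => simp [splitRun]
  | cons x xs ih =>
    by_cases h : x = cont
    · simp only [splitRun, if_pos h]
      exact Nat.le_trans ih (Nat.le_succ _)
    · simp [splitRun, if_neg h]

def fix_bio_sequence_alt (tags : List String) : List String :=
  match tags with
  | [] => []
  | t :: rest =>
    if PySem.Str.startswith t "B-" || PySem.Str.startswith t "I-" then
      let et := PySem.Str.slice t (some 2) none
      let p := splitRun (strCat "I-" et) rest
      (if PySem.Str.startswith t "B-" then t else strCat "B-" et)
        :: (p.1 ++ fix_bio_sequence_alt p.2)
    else
      t :: fix_bio_sequence_alt rest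
termination_by tags.length
decreasing_by
  · exact Nat.lt_succ_of_le (splitRun_snd_length_le _ rest)
  · simp

-- ===== PRECONDITION & SPEC =====
def Spec_fix_bio_sequence (tags : List String) (out : List String) : Prop := out = fix_bio_sequence_alt tags
instance (tags : List String) (out : List String) : Decidable (Spec_fix_bio_sequence tags out) := by unfold Spec_fix_bio_sequence; infer_instance

-- ===== CLAIM =====
def Claim_equal_fix_bio_sequence : Prop := ∀ (tags : List String), Dom_fix_bio_sequence tags → Spec_fix_bio_sequence tags (fix_bio_sequence tags)

-- ===== LEMMAS AND PROOFS =====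

-- A's running prev_entity_type, as a function of the previous tag
def prevTypeOf : Option String → Option String
  | none => none
  | some s =>
    if PySem.Str.startswith s "B-" ∨ PySem.Str.startswith s "I-" then
      some (PySem.Str.slice s (some 2) none)
    else none

-- A's correction of one tag given the running entity type
def stepT (pt : Option String) (tag : String) : String :=
  if PySem.Str.startswith tag "I-" then
    let et := PySem.Str.slice tag (some 2) none
    if pt = some et then tag else strCat "B-" et
  else tag

-- A's pass, recursively, threading the previous tag's entity type
def fixB (pt : Option String) : List String → List String
  | [] => []
  | t :: rest => stepT pt t :: fixB (prevTypeOf (some t)) rest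

-- a tag starting with "B-" does not start with "I-"
theorem not_I_of_B (t : String) (h : PySem.Str.startswith t "B-" = true) :
    ¬ PySem.Str.startswith t "I-" = true := by
  rw [PySem.Str.startswith_eq] at h ⊢
  intro hI
  have h1 := List.prefix_iff_eq_take.mp ((PySem.Chars.startswith_iff _ _).mp h)
  have h2 := List.prefix_iff_eq_take.mp ((PySem.Chars.startswith_iff _ _).mp hI)
  rw [show ("B-".toList : List Char) = ['B','-'] from by decide] at h1
  rw [show ("I-".toList : List Char) = ['I','-'] from by decide] at h2
  simp at h1 h2
  rw [← h2] at h1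
  exact absurd h1 (by decide)

-- a tag starting with "I-" is "I-" ++ its type
theorem toList_slice2 (t : String) : (PySem.Str.slice t (some 2) none).toList = t.toList.drop 2 := by
  simp [PySem.Str.toList_slice]
  rw [PySem.List.slice_from _ (by norm_num)]
  rfl

theorem I_decomp (t : String) (h : PySem.Str.startswith t "I-" = true) :
    t = strCat "I-" (PySem.Str.slice t (some 2) none) := by
  apply String.toList_injective
  rw [PySem.Str.startswith_eq] at h
  have h1 := List.prefix_iff_eq_take.mp ((PySem.Chars.startswith_iff _ _).mp h)
  simp only [strCat, String.toList_ofList, toList_slice2]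
  calc t.toList = t.toList.take 2 ++ t.toList.drop 2 := (List.take_append_drop 2 t.toList).symm
    _ = "I-".toList ++ t.toList.drop 2 := by
        rw [show (2 : Nat) = "I-".toList.length from rfl, ← h1]

-- slice of "I-" ++ et from 2 is et, and it starts with "I-"
theorem slice_Icat (et : String) :
    PySem.Str.slice (strCat "I-" et) (some 2) none = et := by
  apply String.toList_injective
  rw [toList_slice2]
  simp [strCat]

theorem startswith_Icat (et : String) :
    PySem.Str.startswith (strCat "I-" et) "I-" = true := by
  rw [PySem.Str.startswith_eq]
  apply (PySem.Chars.startswith_iff _ _).mpr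
  simp only [strCat, String.toList_ofList]
  exact List.prefix_append _ _

theorem prevTypeOf_I (t : String) (h : PySem.Str.startswith t "I-" = true) :
    prevTypeOf (some t) = some (PySem.Str.slice t (some 2) none) := by
  simp only [prevTypeOf]
  rw [if_pos (Or.inr h)]

theorem prevTypeOf_other (t : String) (hB : ¬ PySem.Str.startswith t "B-" = true)
    (hI : ¬ PySem.Str.startswith t "I-" = true) : prevTypeOf (some t) = none := by
  simp only [prevTypeOf]
  rw [if_neg]
  rintro (h | h)
  · exact hB h
  · exact hI h

-- A's loop from state pt produces exactly fixB from pt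
theorem loop_eq_fixB : ∀ (tags fixed : List String) (pt : Option String),
    fixBioLoop tags fixed pt = fixed ++ fixB pt tags := by
  intro tags
  induction tags with
  | nil => intro fixed pt; simp [fixBioLoop, fixB]
  | cons t rest ih =>
    intro fixed pt
    have e : fixBioLoop (t :: rest) fixed pt =
        (if t = "O" then fixBioLoop rest (fixed ++ [t]) none
         else if PySem.Str.startswith t "B-" = true then
           fixBioLoop rest (fixed ++ [t]) (some (PySem.Str.slice t (some 2) none))
         else if PySem.Str.startswith t "I-" = true then
           fixBioLoop rest
             (fixed ++ [if pt ≠ some (PySem.Str.slice t (some 2) none)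
                        then strCat "B-" (PySem.Str.slice t (some 2) none) else t])
             (some (PySem.Str.slice t (some 2) none))
         else fixBioLoop rest (fixed ++ [t]) none) := rfl
    have f : fixB pt (t :: rest) = stepT pt t :: fixB (prevTypeOf (some t)) rest := rfl
    by_cases hO : t = "O"
    · subst hO
      rw [e, if_pos rfl, ih, f,
          show stepT pt "O" = "O" from by
            unfold stepT; rw [if_neg (by decide : ¬ PySem.Str.startswith "O" "I-" = true)],
          show prevTypeOf (some "O") = none from by
            exact prevTypeOf_other _ (by decide) (by decide),
          List.append_assoc]
      rfl
    · by_cases hB : PySem.Str.startswith t "B-" = true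
      · rw [e, if_neg hO, if_pos hB, ih, f,
            show stepT pt t = t from by unfold stepT; rw [if_neg (not_I_of_B t hB)],
            show prevTypeOf (some t) = some (PySem.Str.slice t (some 2) none) from by
              simp only [prevTypeOf]; rw [if_pos (Or.inl hB)],
            List.append_assoc]
        rfl
      · by_cases hI : PySem.Str.startswith t "I-" = true
        · rw [e, if_neg hO, if_neg hB, if_pos hI, ih, f,
              show stepT pt t = (if pt ≠ some (PySem.Str.slice t (some 2) none)
                  then strCat "B-" (PySem.Str.slice t (some 2) none) else t) from by
                unfold stepT; rw [if_pos hI]; simp only [ne_eq, ite_not],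
              prevTypeOf_I t hI, List.append_assoc]
          rfl
        · rw [e, if_neg hO, if_neg hB, if_neg hI, ih, f,
              show stepT pt t = t from by unfold stepT; rw [if_neg hI],
              prevTypeOf_other t hB hI, List.append_assoc]
          rfl

-- the head of splitRun's remainder is never cont
theorem splitRun_snd_head (cont : String) : ∀ (l : List String),
    (splitRun cont l).2.head? ≠ some cont := by
  intro l
  induction l with
  | nil => simp [splitRun]
  | cons x xs ih =>
    by_cases h : x = cont
    · simpa [splitRun, if_pos h] using ih
    · simp [splitRun, h]

-- fixB in state (some et) copies the run of "I-"++et tags unchanged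
theorem fixB_run (et : String) : ∀ (l : List String),
    fixB (some et) l = (splitRun (strCat "I-" et) l).1 ++ fixB (some et) (splitRun (strCat "I-" et) l).2 := by
  intro l
  induction l with
  | nil => simp [splitRun]
  | cons x xs ih =>
    by_cases h : x = strCat "I-" et
    · subst h
      have hs : stepT (some et) (strCat "I-" et) = strCat "I-" et := by
        unfold stepT
        rw [if_pos (startswith_Icat et), slice_Icat et, if_pos rfl]
      have hp : prevTypeOf (some (strCat "I-" et)) = some et := by
        rw [prevTypeOf_I _ (startswith_Icat et), slice_Icat et]
      show stepT (some et) (strCat "I-" et) :: fixB (prevTypeOf (some (strCat "I-" et))) xs = _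
      rw [hs, hp, ih]
      simp [splitRun]
    · simp only [splitRun, if_neg h]
      rfl

-- fixB equals B's span scan whenever the state cannot match the head
theorem fixB_eq_alt : ∀ (n : Nat) (l : List String), l.length ≤ n →
    ∀ (pt : Option String), (∀ p, pt = some p → l.head? ≠ some (strCat "I-" p)) →
    fixB pt l = fix_bio_sequence_alt l := by
  intro n
  induction n with
  | zero =>
    intro l hl pt _
    rw [List.length_eq_zero_iff.mp (Nat.le_zero.mp hl)]
    rw [fix_bio_sequence_alt]; rfl
  | succ n ih =>
    intro l hl pt hpt
    match l with
    | [] => rw [fix_bio_sequence_alt]; rfl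
    | t :: rest =>
      have halt : fix_bio_sequence_alt (t :: rest) =
          (if PySem.Str.startswith t "B-" || PySem.Str.startswith t "I-" then
            (if PySem.Str.startswith t "B-" then t
             else strCat "B-" (PySem.Str.slice t (some 2) none))
              :: ((splitRun (strCat "I-" (PySem.Str.slice t (some 2) none)) rest).1
                  ++ fix_bio_sequence_alt (splitRun (strCat "I-" (PySem.Str.slice t (some 2) none)) rest).2)
          else t :: fix_bio_sequence_alt rest) := by
        rw [fix_bio_sequence_alt]
      have hrest : rest.length ≤ n := Nat.le_of_succ_le_succ hl
      show stepT pt t :: fixB (prevTypeOf (some t)) rest = _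
      by_cases hB : PySem.Str.startswith t "B-" = true
      · have hI := not_I_of_B t hB
        set et := PySem.Str.slice t (some 2) none with het
        rw [halt, if_pos (by simp only [Bool.or_eq_true]; exact Or.inl hB), if_pos hB]
        have hhd : stepT pt t = t := by unfold stepT; rw [if_neg hI]
        have hpt' : prevTypeOf (some t) = some et := by
          simp only [prevTypeOf]; rw [if_pos (Or.inl hB)]
        rw [hhd, hpt', fixB_run et rest]
        congr 1
        congr 1
        exact ih _ (Nat.le_trans (splitRun_snd_length_le _ rest) hrest) _
          (by intro p hp hh; rw [Option.some_inj.mp hp] at hh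
              exact splitRun_snd_head _ rest hh)
      · by_cases hI : PySem.Str.startswith t "I-" = true
        · set et := PySem.Str.slice t (some 2) none with het
          rw [halt, if_pos (by simp only [Bool.or_eq_true]; exact Or.inr hI), if_neg hB]
          have hne : pt ≠ some et := fun hp =>
            hpt et hp (by simp only [List.head?_cons, het]
                          exact congrArg some (I_decomp t hI))
          have hhd : stepT pt t = strCat "B-" et := by
            unfold stepT; rw [if_pos hI, ← het, if_neg hne]
          have hpt' : prevTypeOf (some t) = some et := by
            rw [prevTypeOf_I t hI, het]
          rw [hhd, hpt', fixB_run et rest]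
          congr 1
          congr 1
          exact ih _ (Nat.le_trans (splitRun_snd_length_le _ rest) hrest) _
            (by intro p hp hh; rw [Option.some_inj.mp hp] at hh
                exact splitRun_snd_head _ rest hh)
        · rw [halt, if_neg (by simp only [Bool.or_eq_true]; rintro (h|h); exacts [hB h, hI h])]
          have hhd : stepT pt t = t := by unfold stepT; rw [if_neg hI]
          rw [hhd, prevTypeOf_other t hB hI,
              ih rest hrest none (by intro p hp; cases hp)]

-- ===== VERDICT =====
theorem fix_bio_sequence_spec : Claim_equal_fix_bio_sequence := by
  intro tags _
  show fix_bio_sequence tags = fix_bio_sequence_alt tags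
  unfold fix_bio_sequence
  by_cases h : tags = []
  · subst h; rw [if_pos rfl, fix_bio_sequence_alt]
  · rw [if_neg h, loop_eq_fixB, List.nil_append]
    exact fixB_eq_alt tags.length tags (Nat.le_refl _) none (by intro p hp; cases hp)
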